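-- pv_equiv track=rewrite | github.com/rayjustinhuang/BitesofPy | community.py | create_user_bar_chart
-- ===== SOURCE A (Python) =====
-- from collections import Counter
--
-- def create_user_bar_chart(content):
--     """Receives csv file (decoded) content and returns a table of timezones
--        and their corresponding member counts in pluses (see Bite/tests)"""
--     country_count = Counter(row[2] for row in content)
--     country_count = sorted(country_count.items(), key=lambda x: x[0])
--
--     str_to_return = ''
--
--     for row in country_count:
--         str_to_return += row[0]
--         str_to_return += ' '*(21-len(row[0]))
--         str_to_return += '| '
--         str_to_return += '+'*row[1]
--         str_to_return += '\n'
--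
--     return str_to_return.splitlines()
--     pass
-- ===== SOURCE B (Python) =====
-- def create_user_bar_chart(content):
--     """Receives csv file (decoded) content and returns a table of timezones
--        and their corresponding member counts in pluses (see Bite/tests)"""
--     keys = sorted(row[2] for row in content)
--     report = ''
--     while keys:
--         tz = keys[0]
--         run = 1
--         while run < len(keys) and keys[run] == tz:
--             run += 1
--         report += tz + ' ' * (21 - len(tz)) + '| ' + '+' * run + '\n'
--         keys = keys[run:]
--     return report.splitlines()
-- ===== Notes on version B (the rewrite author's own statement) =====
-- stated objective: alternative
-- what changed: Replaces A's Counter hash map followed by sorting its items with sorting the key column once and walking it in a single pass over runs of equal keys, counting each run directly while building the report.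
import Mathlib
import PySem

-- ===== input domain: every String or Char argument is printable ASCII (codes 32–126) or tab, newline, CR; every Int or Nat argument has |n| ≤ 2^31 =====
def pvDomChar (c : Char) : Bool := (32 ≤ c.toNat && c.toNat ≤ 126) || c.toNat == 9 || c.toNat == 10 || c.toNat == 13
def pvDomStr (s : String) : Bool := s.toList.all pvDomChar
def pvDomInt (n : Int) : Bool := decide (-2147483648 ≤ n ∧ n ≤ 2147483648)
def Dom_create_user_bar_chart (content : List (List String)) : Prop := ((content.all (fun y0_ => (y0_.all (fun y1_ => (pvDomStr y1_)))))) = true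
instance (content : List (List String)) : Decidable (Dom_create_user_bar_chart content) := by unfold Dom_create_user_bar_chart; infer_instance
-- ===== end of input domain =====

-- B replaces A's Counter hash map + sort of its items by sorting the key column once and
-- counting runs of equal keys in a single pass while building the report (alternative decomposition).

-- ===== PORT A =====
-- row[2] (raises IndexError on rows shorter than 3; Pre_ excludes those, so the default is never read)
def pvRowKey (row : List String) : String := PySem.List.pyGetD row 2 ""

def create_user_bar_chart (content : List (List String)) : List String :=
  let country_count := PySem.Dict.counter (content.map pvRowKey)
  let sorted_items := PySem.List.sorted country_count.items (fun x => x.1)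
  let str_to_return : List Char := sorted_items.foldl
    (fun acc row => acc ++ row.1.toList ++ List.replicate (21 - row.1.toList.length) ' '
      ++ ['|', ' '] ++ List.replicate row.2.toNat '+' ++ ['\n']) []
  (PySem.Chars.splitlines str_to_return).map String.ofList

-- ===== PORT B =====
-- the outer while loop of Source B: take the run of keys equal to the head, append its bar line, drop the run
def pvReport : List String → List Char → List Char
  | [], report => report
  | tz :: rest, report =>
      let run := 1 + (rest.takeWhile (fun x => x == tz)).length
      pvReport (rest.dropWhile (fun x => x == tz))
        (report ++ tz.toList ++ List.replicate (21 - tz.toList.length) ' '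
          ++ ['|', ' '] ++ List.replicate run '+' ++ ['\n'])
termination_by keys _ => keys.length
decreasing_by
  exact Nat.lt_succ_of_le (List.length_dropWhile_le _ _)

def create_user_bar_chart_alt (content : List (List String)) : List String :=
  let keys := PySem.List.sorted (content.map pvRowKey) (fun x => x)
  (PySem.Chars.splitlines (pvReport keys [])).map String.ofList

-- ===== PRECONDITION & SPEC =====
-- Pre_: every row must have at least 3 fields; on shorter rows the Python A raises IndexError at row[2].
def Pre_create_user_bar_chart (content : List (List String)) : Prop :=
  ∀ row ∈ content, 3 ≤ row.length
instance (content : List (List String)) : Decidable (Pre_create_user_bar_chart content) := by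
  unfold Pre_create_user_bar_chart; infer_instance
def pvWitness_create_user_bar_chart : List (List String) := [["ann", "a@b.c", "Europe/Paris"], ["bob", "b@b.c", "Europe/Paris"]]

def Spec_create_user_bar_chart (content : List (List String)) (out : List String) : Prop := out = create_user_bar_chart_alt content
instance (content : List (List String)) (out : List String) : Decidable (Spec_create_user_bar_chart content out) := by unfold Spec_create_user_bar_chart; infer_instance

-- ===== CLAIM (what is proved, stated in full; the proofs are below) =====
def Claim_equal_create_user_bar_chart : Prop := ∀ (content : List (List String)), Dom_create_user_bar_chart content → Pre_create_user_bar_chart content → Spec_create_user_bar_chart content (create_user_bar_chart content)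

-- ===== LEMMAS AND PROOFS =====
-- the bar line of one key with its count, as A's loop body emits it
def pvChunk (k : String) (n : Nat) : List Char :=
  k.toList ++ List.replicate (21 - k.toList.length) ' ' ++ ['|', ' '] ++ List.replicate n '+' ++ ['\n']

-- the first key of each run of equal keys
def pvRunHeads : List String → List String
  | [] => []
  | k :: rest => k :: pvRunHeads (rest.dropWhile (fun x => x == k))
termination_by keys => keys.length
decreasing_by
  exact Nat.lt_succ_of_le (List.length_dropWhile_le _ _)

theorem pvRunHeads_subset : ∀ (l : List String), ∀ x ∈ pvRunHeads l, x ∈ l := by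
  intro l
  induction l using pvRunHeads.induct with
  | case1 => simp [pvRunHeads]
  | case2 k rest ih =>
    intro x hx
    rw [pvRunHeads] at hx
    rcases List.mem_cons.mp hx with rfl | hx
    · exact List.mem_cons_self
    · exact List.mem_cons_of_mem _ ((List.dropWhile_sublist _).subset (ih x hx))

-- in a sorted tail, everything after the dropped run of k's is strictly greater than k
theorem pv_dropWhile_gt (k : String) (rest : List String)
    (h1 : ∀ x ∈ rest, k ≤ x) (h2 : rest.Pairwise (· ≤ ·)) :
    ∀ x ∈ rest.dropWhile (fun y => y == k), k < x := by
  induction rest with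
  | nil => simp
  | cons r rs ih =>
    by_cases hr : r = k
    · subst hr
      rw [List.dropWhile_cons_of_pos (by simp)]
      exact ih (fun x hx => (List.rel_of_pairwise_cons h2 hx)) h2.of_cons
    · rw [List.dropWhile_cons_of_neg (by simp [hr])]
      intro x hx
      have hkr : k < r := lt_of_le_of_ne (h1 r (by simp)) (fun h => hr h.symm)
      rcases List.mem_cons.mp hx with rfl | hx
      · exact hkr
      · exact lt_of_lt_of_le hkr (List.rel_of_pairwise_cons h2 hx)

theorem pvRunHeads_mem (l : List String) (h : l.Pairwise (· ≤ ·)) :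
    ∀ x ∈ l, x ∈ pvRunHeads l := by
  induction l using pvRunHeads.induct with
  | case1 => simp
  | case2 k rest ih =>
    intro x hx
    rw [pvRunHeads]
    rcases List.mem_cons.mp hx with rfl | hx
    · exact List.mem_cons_self
    · rw [← List.takeWhile_append_dropWhile (p := fun y => y == k) (l := rest)] at hx
      rcases List.mem_append.mp hx with hx | hx
      · have := List.mem_takeWhile_imp hx
        simp at this
        simp [this]
      · exact List.mem_cons_of_mem _
          (ih (List.Pairwise.sublist (List.dropWhile_sublist _) h.of_cons) x hx)

theorem pvRunHeads_pairwise_lt (l : List String) (h : l.Pairwise (· ≤ ·)) :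
    (pvRunHeads l).Pairwise (· < ·) := by
  induction l using pvRunHeads.induct with
  | case1 => simp [pvRunHeads]
  | case2 k rest ih =>
    rw [pvRunHeads]
    refine List.pairwise_cons.mpr ⟨?_, ih (List.Pairwise.sublist (List.dropWhile_sublist _) h.of_cons)⟩
    intro y hy
    exact pv_dropWhile_gt k rest (fun x hx => List.rel_of_pairwise_cons h hx) h.of_cons y
      (pvRunHeads_subset _ y hy)

-- B's loop on a sorted list emits exactly one chunk per run head, with the full count of that key
theorem pvReport_eq (l : List String) (h : l.Pairwise (· ≤ ·)) : ∀ (report : List Char),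
    pvReport l report = report ++ (pvRunHeads l).flatMap (fun k => pvChunk k (l.count k)) := by
  induction l using pvRunHeads.induct with
  | case1 => intro report; simp [pvReport, pvRunHeads]
  | case2 k rest ih =>
    intro report
    have hrest : rest.Pairwise (· ≤ ·) := h.of_cons
    have hge : ∀ x ∈ rest, k ≤ x := fun x hx => List.rel_of_pairwise_cons h hx
    have hgt : ∀ x ∈ rest.dropWhile (fun y => y == k), k < x := pv_dropWhile_gt k rest hge hrest
    have hsplit : rest.takeWhile (fun y => y == k) ++ rest.dropWhile (fun y => y == k) = rest :=
      List.takeWhile_append_dropWhile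
    have htake : (rest.takeWhile (fun y => y == k)).count k
        = (rest.takeWhile (fun y => y == k)).length :=
      List.count_eq_length.mpr (fun x hx => by
        have := List.mem_takeWhile_imp hx; simp at this; simp [this])
    have hdropz : (rest.dropWhile (fun y => y == k)).count k = 0 :=
      List.count_eq_zero.mpr (fun hk => absurd rfl (ne_of_gt (hgt k hk)))
    have hrc : ∀ v : String, (rest.takeWhile (fun y => y == k)).count v
        + (rest.dropWhile (fun y => y == k)).count v = rest.count v := by
      intro v; rw [← List.count_append, hsplit]
    -- the run length is the total count of k
    have hcount : (k :: rest).count k = 1 + (rest.takeWhile (fun y => y == k)).length := by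
      rw [List.count_cons_self]
      have := hrc k
      omega
    -- later keys do not occur in the dropped run, so their counts restrict to the remainder
    have htrans : ∀ k' ∈ pvRunHeads (rest.dropWhile (fun y => y == k)),
        (rest.dropWhile (fun y => y == k)).count k' = (k :: rest).count k' := by
      intro k' hk'
      have hk'mem := pvRunHeads_subset _ k' hk'
      have hkk' : k' ≠ k := ne_of_gt (hgt k' hk'mem)
      have h1 : (rest.takeWhile (fun y => y == k)).count k' = 0 :=
        List.count_eq_zero.mpr (fun hk => by
          have := List.mem_takeWhile_imp hk; simp at this
          exact hkk' this)
      have h2 : List.count k' (k :: rest) = List.count k' rest := by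
        simp [Ne.symm hkk']
      have := hrc k'
      omega
    rw [pvReport, ih (List.Pairwise.sublist (List.dropWhile_sublist _) hrest), pvRunHeads,
      List.flatMap_cons]
    rw [List.flatMap_congr (h := fun k' hk' => by rw [htrans k' hk'])]
    simp [pvChunk, hcount]

theorem pv_ports_eq (content : List (List String)) :
    create_user_bar_chart content = create_user_bar_chart_alt content := by
  simp only [create_user_bar_chart, create_user_bar_chart_alt]
  set m := content.map pvRowKey with hm
  set s := PySem.List.sorted m (fun x => x) with hs
  have hsp : s.Pairwise (· ≤ ·) := PySem.List.sorted_pairwise m (fun x => x)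
  have hperm : s.Perm m := PySem.List.sorted_perm m (fun x => x) false
  -- A's sorted counter items are exactly B's run heads paired with their counts
  have hheads : PySem.List.sorted (PySem.Set.ofList m) (fun x => x) = pvRunHeads s := by
    apply PySem.List.sorted_eq_of_perm_of_pairwise_lt
    · refine (List.perm_ext_iff_of_nodup ?_ ?_).mpr ?_
      · exact (pvRunHeads_pairwise_lt s hsp).imp ne_of_lt
      · exact PySem.Set.nodup_ofList m
      · intro x
        rw [PySem.Set.mem_ofList, ← hperm.mem_iff]
        exact ⟨fun hx => pvRunHeads_subset s x hx, pvRunHeads_mem s hsp x⟩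
    · exact pvRunHeads_pairwise_lt s hsp
  have hp1 : (pvRunHeads s).Perm (PySem.Set.ofList m) :=
    hheads ▸ PySem.List.sorted_perm (PySem.Set.ofList m) (fun x => x) false
  have hsorted : PySem.List.sorted (PySem.Dict.counter m).items (fun x => x.1)
      = (pvRunHeads s).map (fun k => (k, (m.count k : Int))) := by
    rw [PySem.Dict.items_counter]
    refine PySem.List.sorted_eq_of_perm_of_pairwise_lt _ _ _ (hp1.map _) ?_
    rw [List.pairwise_map]
    exact hheads ▸ PySem.List.sorted_ofList_pairwise_lt m
  rw [hsorted, List.foldl_map]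
  congr 2
  rw [pvReport_eq s hsp [], List.nil_append]
  have hfun : (fun (acc : List Char) (x : String) =>
        acc ++ ((fun k => (k, (m.count k : Int))) x).1.toList
          ++ List.replicate (21 - ((fun k => (k, (m.count k : Int))) x).1.toList.length) ' '
          ++ ['|', ' '] ++ List.replicate ((fun k => (k, (m.count k : Int))) x).2.toNat '+' ++ ['\n'])
      = fun acc k => acc ++ pvChunk k (s.count k) := by
    funext acc k
    simp [pvChunk, hperm.count_eq]
  rw [hfun, PySem.List.foldl_append_eq_flatMap, List.nil_append]

-- ===== VERDICT (by name: the statement is the Claim_ definition above) =====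
theorem create_user_bar_chart_spec : Claim_equal_create_user_bar_chart := by
  intro content _ _
  unfold Spec_create_user_bar_chart
  exact pv_ports_eq content
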